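-- pv_equiv track=rewrite | github.com/aerovfx/Fullstack4kid | TOPIC_PYTHON/TOPIC_PYTHONBASIC/CACBAITAPPYTHONKINHDIEN/LEVEL2/b14L2_mang2chieuv2.py | find_max_min_index
-- ===== SOURCE A (Python) =====
-- def find_max_min_index(A):
--     max_val, min_val = A[0][0], A[0][0]
--     max_row, max_col, min_row, min_col = 0, 0, 0, 0
--     m, n = len(A), len(A[0])
--     for i in range(m):
--         for j in range(n):
--             if A[i][j] > max_val:
--                 max_val = A[i][j]
--                 max_row, max_col = i, j
--             if A[i][j] < min_val:
--                 min_val = A[i][j]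
--                 min_row, min_col = i, j
--     return max_val, max_row, max_col, min_val, min_row, min_col
-- ===== SOURCE B (Python) =====
-- def find_max_min_index(A):
--     n = len(A[0])
--     cells = [(row[j], i, j) for i, row in enumerate(A) for j in range(n)]
--     mx = max(cells, key=lambda c: c[0])
--     mn = min(cells, key=lambda c: c[0])
--     return mx[0], mx[1], mx[2], mn[0], mn[1], mn[2]
-- ===== Notes on version B (the rewrite author's own statement) =====
-- stated objective: simpler
-- what changed: Replaces the hand-written nested index loops with six running variables by flattening the matrix into (value,row,col) cells once and reducing with the built-in max/min (key on the value), whose first-extremal rule reproduces A's strict-inequality tie-breaking.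
import Mathlib
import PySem

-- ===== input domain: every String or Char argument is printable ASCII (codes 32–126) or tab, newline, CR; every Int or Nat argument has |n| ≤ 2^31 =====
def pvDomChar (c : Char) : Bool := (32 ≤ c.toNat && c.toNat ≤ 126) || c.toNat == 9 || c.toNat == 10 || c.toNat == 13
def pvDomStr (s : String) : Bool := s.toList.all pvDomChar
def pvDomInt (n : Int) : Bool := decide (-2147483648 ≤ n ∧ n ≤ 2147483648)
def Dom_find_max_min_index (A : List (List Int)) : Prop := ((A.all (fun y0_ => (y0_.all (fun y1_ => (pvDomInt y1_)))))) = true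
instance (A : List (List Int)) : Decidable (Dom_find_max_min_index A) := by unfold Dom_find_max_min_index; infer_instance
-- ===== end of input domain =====

-- B flattens the matrix into (value,row,col) cells once and reduces with the
-- built-in first-extremal max/min instead of A's nested index loops over six
-- running variables; objective: simpler.

-- ===== PORT A =====
-- A[i][j] in Python; Pre_ guarantees the indices are in range, so the getD
-- defaults are never reached on admitted inputs.
def pvCellA (A : List (List Int)) (i j : Int) : Int :=
  (PySem.List.pyGet? ((PySem.List.pyGet? A i).getD []) j).getD 0

def find_max_min_index (A : List (List Int)) : Int × Int × Int × Int × Int × Int :=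
  -- max_val, min_val = A[0][0], A[0][0]; max_row = max_col = min_row = min_col = 0
  let a00 := pvCellA A 0 0
  let m : Int := A.length
  let n : Int := ((PySem.List.pyGet? A 0).getD []).length
  let st :=
    (PySem.List.pyRange 0 m).foldl (fun st i =>
      (PySem.List.pyRange 0 n).foldl (fun st j =>
        let v := pvCellA A i j
        let st1 := if st.1 < v then (v, i, j, st.2.2.2) else st
        if v < st1.2.2.2.1 then (st1.1, st1.2.1, st1.2.2.1, v, i, j) else st1)
        st)
      ((a00, 0, 0, a00, 0, 0) : Int × Int × Int × Int × Int × Int)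
  st

-- ===== PORT B =====
def find_max_min_index_alt (A : List (List Int)) : Int × Int × Int × Int × Int × Int :=
  let n : Int := ((PySem.List.pyGet? A 0).getD []).length
  let cells : List (Int × Int × Int) :=
    (PySem.List.enumerate A).flatMap (fun p =>
      (PySem.List.pyRange 0 n).map (fun j => (((PySem.List.pyGet? p.2 j).getD 0), p.1, j)))
  let mx := (PySem.List.max? cells (fun c => c.1)).getD (0, 0, 0)
  let mn := (PySem.List.min? cells (fun c => c.1)).getD (0, 0, 0)
  (mx.1, mx.2.1, mx.2.2, mn.1, mn.2.1, mn.2.2)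

-- ===== PRECONDITION & SPEC =====
-- Pre_ is exactly where the Python A returns: A raises IndexError on an empty
-- matrix, an empty first row, or a row shorter than the first row.
def Pre_find_max_min_index (A : List (List Int)) : Prop :=
  A ≠ [] ∧ A.headD [] ≠ [] ∧ ∀ row ∈ A, (A.headD []).length ≤ row.length
instance (A : List (List Int)) : Decidable (Pre_find_max_min_index A) := by
  unfold Pre_find_max_min_index; infer_instance
def pvWitness_find_max_min_index : List (List Int) := [[3, -1], [4, 0]]

def Spec_find_max_min_index (A : List (List Int)) (out : Int × Int × Int × Int × Int × Int) : Prop := out = find_max_min_index_alt A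
instance (A : List (List Int)) (out : Int × Int × Int × Int × Int × Int) : Decidable (Spec_find_max_min_index A out) := by unfold Spec_find_max_min_index; infer_instance

-- ===== CLAIM (what is proved, stated in full; the proofs are below) =====
def Claim_equal_find_max_min_index : Prop := ∀ (A : List (List Int)), Dom_find_max_min_index A → Pre_find_max_min_index A → Spec_find_max_min_index A (find_max_min_index A)

-- ===== LEMMAS AND PROOFS =====

-- The common cell list both ports are folds over.
def pvCells (A : List (List Int)) : List (Int × Int × Int) :=
  (List.range A.length).flatMap (fun i =>
    (List.range (A.headD []).length).map (fun j =>
      (((A.getD i []).getD j 0 : Int), (i : Int), (j : Int))))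

def pvStepMax (m c : Int × Int × Int) : Int × Int × Int := if m.1 < c.1 then c else m
def pvStepMin (m c : Int × Int × Int) : Int × Int × Int := if c.1 < m.1 then c else m

def pvStepA (st : Int × Int × Int × Int × Int × Int) (c : Int × Int × Int) :
    Int × Int × Int × Int × Int × Int :=
  let st1 := if st.1 < c.1 then (c.1, c.2.1, c.2.2, st.2.2.2) else st
  if c.1 < st1.2.2.2.1 then (st1.1, st1.2.1, st1.2.2.1, c.1, c.2.1, c.2.2) else st1

def pvPack (mx mn : Int × Int × Int) : Int × Int × Int × Int × Int × Int :=
  (mx.1, mx.2.1, mx.2.2, mn.1, mn.2.1, mn.2.2)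

lemma pyRange_zero_nat (n : Nat) :
    PySem.List.pyRange 0 (n : Int) = (List.range n).map (fun k => Int.ofNat k) := by
  simp [PySem.List.pyRange]
  rcases Nat.eq_zero_or_pos n with h | h
  · subst h; simp
  · rw [if_pos h]

lemma foldl_int_range {β : Type} (f : β → Int → β) (init : β) (n : Nat) :
    List.foldl f init (PySem.List.pyRange 0 (n : Int))
      = List.foldl (fun acc (k : Nat) => f acc (Int.ofNat k)) init (List.range n) := by
  rw [pyRange_zero_nat, List.foldl_map]

lemma enumerate_eq (A : List (List Int)) (s : Int) :
    PySem.List.enumerate A s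
      = (List.range A.length).map (fun (k : Nat) => ((s + (k : Int)), A.getD k [])) := by
  induction A generalizing s with
  | nil => simp [PySem.List.enumerate]
  | cons x t ih =>
      rw [show PySem.List.enumerate (x :: t) s = (s, x) :: PySem.List.enumerate t (s + 1) from rfl,
        ih, List.length_cons, List.range_succ_eq_map, List.map_cons, List.map_map]
      refine congrArg₂ _ (by simp) ?_
      apply List.map_congr_left; intro k _
      simp [Function.comp]; ring_nf

lemma head_getD (A : List (List Int)) (h : A ≠ []) :
    (PySem.List.pyGet? A 0).getD [] = A.headD [] := by
  cases A with
  | nil => exact absurd rfl h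
  | cons x t =>
      have h0 := PySem.List.pyGet?_natCast (x :: t) 0
      simp only [Nat.cast_zero] at h0
      rw [h0]
      rfl

lemma cell_eq (A : List (List Int)) (i j : Nat) :
    pvCellA A ((i : Nat) : Int) ((j : Nat) : Int) = (A.getD i []).getD j 0 := by
  simp [pvCellA, PySem.List.pyGet?_natCast, List.getD_eq_getElem?_getD]

lemma getD0_headD (A : List (List Int)) : A.getD 0 [] = A.headD [] := by
  cases A <;> rfl

lemma cell00 (A : List (List Int)) : pvCellA A 0 0 = (A.headD []).getD 0 0 := by
  have h := cell_eq A 0 0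
  simp only [Nat.cast_zero] at h
  rw [h, getD0_headD]

-- A's nested index loops are the fold of pvStepA over pvCells.
lemma portA_eq_fold (A : List (List Int)) (h : A ≠ []) :
    find_max_min_index A
      = List.foldl pvStepA
          (pvPack ((A.headD []).getD 0 0, 0, 0) ((A.headD []).getD 0 0, 0, 0))
          (pvCells A) := by
  simp only [find_max_min_index, head_getD A h, cell00, foldl_int_range,
    pvCells, List.foldl_flatMap, List.foldl_map, pvPack]
  apply PySem.List.foldl_congr_mem
  intro acc i _
  apply PySem.List.foldl_congr_mem
  intro st j _
  simp only [Int.ofNat_eq_natCast, cell_eq, pvStepA]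

-- B's cell list is pvCells.
lemma cells_alt_eq (A : List (List Int)) (h : A ≠ []) :
    (PySem.List.enumerate A).flatMap (fun p =>
      (PySem.List.pyRange 0 (((PySem.List.pyGet? A 0).getD []).length : Int)).map
        (fun j => (((PySem.List.pyGet? p.2 j).getD 0), p.1, j)))
      = pvCells A := by
  rw [head_getD A h, enumerate_eq, List.flatMap_map, pvCells]
  rw [List.flatMap_def, List.flatMap_def]
  refine congrArg _ (List.map_congr_left ?_)
  intro i _
  rw [pyRange_zero_nat, List.map_map]
  apply List.map_congr_left
  intro j _
  simp [Function.comp, Int.ofNat_eq_natCast, PySem.List.pyGet?_natCast,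
    List.getD_eq_getElem?_getD]

lemma max?_cons (c : Int × Int × Int) (t : List (Int × Int × Int)) :
    PySem.List.max? (c :: t) (fun x => x.1) = some (List.foldl pvStepMax c t) := by
  induction t generalizing c with
  | nil => rfl
  | cons x t ih =>
      have h1 : PySem.List.max? (c :: x :: t) (fun y => y.1)
          = PySem.List.max? (pvStepMax c x :: t) (fun y => y.1) := by
        simp only [PySem.List.max?, List.foldl_cons, pvStepMax]
        split <;> rfl
      rw [h1, ih, List.foldl_cons]

lemma min?_cons (c : Int × Int × Int) (t : List (Int × Int × Int)) :
    PySem.List.min? (c :: t) (fun x => x.1) = some (List.foldl pvStepMin c t) := by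
  induction t generalizing c with
  | nil => rfl
  | cons x t ih =>
      have h1 : PySem.List.min? (c :: x :: t) (fun y => y.1)
          = PySem.List.min? (pvStepMin c x :: t) (fun y => y.1) := by
        simp only [PySem.List.min?, List.foldl_cons, pvStepMin]
        split <;> rfl
      rw [h1, ih, List.foldl_cons]

-- The single six-variable fold splits into the max fold and the min fold.
lemma fold_split (cells : List (Int × Int × Int)) (mx mn : Int × Int × Int) :
    List.foldl pvStepA (pvPack mx mn) cells
      = pvPack (List.foldl pvStepMax mx cells) (List.foldl pvStepMin mn cells) := by
  induction cells generalizing mx mn with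
  | nil => rfl
  | cons c t ih =>
      have hstep : pvStepA (pvPack mx mn) c = pvPack (pvStepMax mx c) (pvStepMin mn c) := by
        simp only [pvStepA, pvPack, pvStepMax, pvStepMin]
        split_ifs <;> simp_all
      rw [List.foldl_cons, hstep, ih, List.foldl_cons, List.foldl_cons]

lemma stepA_self (c : Int × Int × Int) : pvStepA (pvPack c c) c = pvPack c c := by
  simp [pvStepA, pvPack]

-- pvCells of an admitted matrix starts with the (0,0) cell.
lemma cells_head (A : List (List Int)) (h1 : A ≠ []) (h2 : A.headD [] ≠ []) :
    ∃ t, pvCells A = ((A.headD []).getD 0 0, 0, 0) :: t := by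
  cases A with
  | nil => exact absurd rfl h1
  | cons r rest =>
      cases r with
      | nil => exact absurd rfl h2
      | cons x xs =>
          have hh : (pvCells ((x :: xs) :: rest)).head?
              = some ((((x :: xs) :: rest).headD []).getD 0 0, 0, 0) := by
            simp [pvCells, List.range_succ_eq_map]
          exact ⟨_, (List.cons_head?_tail hh).symm⟩

-- ===== VERDICT (by name: the statement is the Claim_ definition above) =====
theorem find_max_min_index_spec : Claim_equal_find_max_min_index := by
  intro A _ hpre
  obtain ⟨h1, h2, -⟩ := hpre
  obtain ⟨t, ht⟩ := cells_head A h1 h2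
  unfold Spec_find_max_min_index
  rw [portA_eq_fold A h1, find_max_min_index_alt]
  simp only [cells_alt_eq A h1, ht, max?_cons, min?_cons, List.foldl_cons,
    stepA_self, fold_split, Option.getD_some]
  rfl
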